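/- GENERATED by farm/mkstatement.py from design/units.tsv (unit `start_decoder.9d`) and the assertions of Vorbis/Spec/StartDecoder9.lean — do not edit.
   THE STATEMENT of the proof unit `start_decoder.9d`: segment 9d of `start_decoder` (9 instructions; entries 0x11420a;
   exits 0x113b22,0x11421f; ranges 0x11420a-0x11421a + 0x114415-0x114422)
   takes each of its entry assertions to one of its exit assertions (`Vorbis.Spec.StartDecoder.Seg9d`), given the contracts of its callees.
   What the names mean: Vorbis/Spec/Basic.lean (the shared hypotheses), Vorbis/Spec/StartDecoder9.lean (the assertions). The theorem to prove:
   `theorem start_decoder_9d_ok : Vorbis.Spec.start_decoder_9d.Statement`. -/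
import Vorbis.Spec.Leaves
import Vorbis.Spec.Reader
import Vorbis.Spec.StartDecoder9
namespace Vorbis.Spec.start_decoder_9d
open X86 X86.User Asan

/-- The statement of unit `start_decoder.9d`. -/
def Statement : Prop :=
  ∀ (Lay : Layout) (_hLay : Lay.hi = 0x1000000) (μ : Microarch) (_hμ : UserX.MicroOK μ) (u₀ : State)
    (_hcode : HasCodeNat Lay u₀ Vorbis.L.start_decoder.entry Vorbis.Code.code_start_decoder.nat Vorbis.L.start_decoder.size)
    (_h_error : ∀ (others : List Obj) (frames : List (Nat × FrameLayout)), Calls Lay μ Vorbis.WayInv (Vorbis.conv u₀) Vorbis.L.error.entry (Vorbis.Spec.error.spec others frames))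
    (_h_get_bits : ∀ (others : List Obj) (frames : List (Nat × FrameLayout)) (Blk : Block → Prop) (len : Nat), Calls Lay μ Vorbis.WayInv (Vorbis.conv u₀) Vorbis.L.get_bits.entry (Vorbis.Spec.get_bits.spec others frames Blk len)),
    Vorbis.Spec.StartDecoder.Seg9d Lay μ u₀

end Vorbis.Spec.start_decoder_9d
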